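-- pv_equiv track=rewrite | github.com/bougzy/narmonix-studio | services/ai/harmony.py | _generate_simple_harmony
-- ===== SOURCE A (Python) =====
-- from typing import List, Dict
--
-- VOICE_RANGES = {
--     "soprano": (60, 79),  # C4 to G5
--     "alto": (55, 74),  # G3 to D5
--     "tenor": (48, 69),  # C3 to A4
--     "bass": (40, 64),  # E2 to E4
-- }
--
-- def _generate_simple_harmony(
--     melody_midi: List[int], key_name: str, scale_type: str
-- ) -> tuple:
--     """Fallback: generate harmonies using simple interval rules."""
--     # Major/minor third and fifth intervals
--     if scale_type == "minor":
--         third_interval = 3  # Minor third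
--         fifth_interval = 7  # Perfect fifth
--     else:
--         third_interval = 4  # Major third
--         fifth_interval = 7  # Perfect fifth
--
--     soprano = []
--     alto = []
--     tenor = []
--     bass = []
--
--     for midi_note in melody_midi:
--         if midi_note <= 0:
--             soprano.append(0)
--             alto.append(0)
--             tenor.append(0)
--             bass.append(0)
--             continue
--
--         # Soprano: melody note in soprano range
--         s = _fit_to_range(midi_note, *VOICE_RANGES["soprano"])
--
--         # Alto: third below melody
--         a = _fit_to_range(midi_note - third_interval, *VOICE_RANGES["alto"])
--
--         # Tenor: fifth below melody
--         t = _fit_to_range(midi_note - fifth_interval, *VOICE_RANGES["tenor"])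
--
--         # Bass: octave below melody (root)
--         b = _fit_to_range(midi_note - 12, *VOICE_RANGES["bass"])
--
--         soprano.append(s)
--         alto.append(a)
--         tenor.append(t)
--         bass.append(b)
--
--     return soprano, alto, tenor, bass
--
-- def _fit_to_range(midi_note: int, low: int, high: int) -> int:
--     """Fit a MIDI note into the specified range by octave transposition."""
--     if midi_note <= 0:
--         return 0
--
--     while midi_note < low:
--         midi_note += 12
--     while midi_note > high:
--         midi_note -= 12
--
--     # Clamp to range
--     return max(low, min(high, midi_note))
-- ===== SOURCE B (Python) =====
-- def _fit_closed(midi_note, low, high):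
--     """Closed-form octave placement: no loops."""
--     if midi_note <= 0:
--         return 0
--     if midi_note < low:
--         return low + (midi_note - low) % 12
--     if midi_note > high:
--         return midi_note + 12 * ((high - midi_note) // 12)
--     return midi_note
--
--
-- def _generate_simple_harmony(melody_midi, key_name, scale_type):
--     third = 3 if scale_type == "minor" else 4
--
--     def voice(offset, low, high):
--         return [_fit_closed(n - offset, low, high) if n > 0 else 0
--                 for n in melody_midi]
--
--     return (voice(0, 60, 79),      # soprano
--             voice(third, 55, 74),  # alto
--             voice(7, 48, 69),      # tenor
--             voice(12, 40, 64))     # bass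
-- ===== Notes on version B (the rewrite author's own statement) =====
-- stated objective: faster
-- what changed: Replaced the two while-loop octave-transposition loops (and the now-inert clamp) in _fit_to_range with closed-form modular arithmetic, and built the four voices as comprehensions per voice instead of appending to four lists inside one loop.
import Mathlib
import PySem

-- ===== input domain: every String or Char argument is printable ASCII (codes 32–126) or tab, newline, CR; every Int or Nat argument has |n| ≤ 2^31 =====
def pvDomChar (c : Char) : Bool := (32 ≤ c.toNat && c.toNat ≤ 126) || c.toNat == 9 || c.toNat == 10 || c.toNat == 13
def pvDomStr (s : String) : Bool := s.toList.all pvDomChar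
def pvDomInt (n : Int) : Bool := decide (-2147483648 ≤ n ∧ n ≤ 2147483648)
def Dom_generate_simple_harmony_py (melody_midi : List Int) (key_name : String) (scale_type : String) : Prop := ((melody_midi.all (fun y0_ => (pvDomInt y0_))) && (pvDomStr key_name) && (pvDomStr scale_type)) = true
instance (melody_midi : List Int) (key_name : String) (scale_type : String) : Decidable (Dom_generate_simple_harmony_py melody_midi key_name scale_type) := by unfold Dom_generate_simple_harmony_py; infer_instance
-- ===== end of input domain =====

-- B replaces A's two octave-transposition while-loops by closed-form modular arithmetic (faster for large notes).

-- ===== PORT A =====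
-- while midi_note < low: midi_note += 12
def pvFitRaise (m low : Int) : Int :=
  if m < low then pvFitRaise (m + 12) low else m
  termination_by (low - m).toNat
  decreasing_by omega

-- while midi_note > high: midi_note -= 12
def pvFitLower (m high : Int) : Int :=
  if m > high then pvFitLower (m - 12) high else m
  termination_by (m - high).toNat
  decreasing_by omega

def pvFitToRange (midi_note low high : Int) : Int :=
  if midi_note ≤ 0 then 0
  else max low (min high (pvFitLower (pvFitRaise midi_note low) high))

def generate_simple_harmony_py (melody_midi : List Int) (key_name : String) (scale_type : String) : List Int × List Int × List Int × List Int :=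
  let third_interval : Int := if scale_type = "minor" then 3 else 4
  let fifth_interval : Int := 7
  melody_midi.foldl
    (fun (acc : List Int × List Int × List Int × List Int) midi_note =>
      let (soprano, alto, tenor, bass) := acc
      if midi_note ≤ 0 then
        (soprano ++ [0], alto ++ [0], tenor ++ [0], bass ++ [0])
      else
        let s := pvFitToRange midi_note 60 79
        let a := pvFitToRange (midi_note - third_interval) 55 74
        let t := pvFitToRange (midi_note - fifth_interval) 48 69
        let b := pvFitToRange (midi_note - 12) 40 64
        (soprano ++ [s], alto ++ [a], tenor ++ [t], bass ++ [b]))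
    ([], [], [], [])

-- ===== PORT B =====
def pvFitClosed (midi_note low high : Int) : Int :=
  if midi_note ≤ 0 then 0
  else if midi_note < low then low + PySem.Int.mod (midi_note - low) 12
  else if midi_note > high then midi_note + 12 * PySem.Int.floordiv (high - midi_note) 12
  else midi_note

def pvVoice (melody_midi : List Int) (offset low high : Int) : List Int :=
  melody_midi.map (fun n => if n > 0 then pvFitClosed (n - offset) low high else 0)

def generate_simple_harmony_py_alt (melody_midi : List Int) (key_name : String) (scale_type : String) : List Int × List Int × List Int × List Int :=
  let third : Int := if scale_type = "minor" then 3 else 4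
  (pvVoice melody_midi 0 60 79,
   pvVoice melody_midi third 55 74,
   pvVoice melody_midi 7 48 69,
   pvVoice melody_midi 12 40 64)

-- ===== PRECONDITION & SPEC =====
def Spec_generate_simple_harmony_py (melody_midi : List Int) (key_name : String) (scale_type : String) (out : List Int × List Int × List Int × List Int) : Prop := out = generate_simple_harmony_py_alt melody_midi key_name scale_type
instance (melody_midi : List Int) (key_name : String) (scale_type : String) (out : List Int × List Int × List Int × List Int) : Decidable (Spec_generate_simple_harmony_py melody_midi key_name scale_type out) := by unfold Spec_generate_simple_harmony_py; infer_instance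

-- ===== CLAIM (what is proved, stated in full; the proofs are below) =====
def Claim_equal_generate_simple_harmony_py : Prop := ∀ (melody_midi : List Int) (key_name : String) (scale_type : String), Dom_generate_simple_harmony_py melody_midi key_name scale_type → Spec_generate_simple_harmony_py melody_midi key_name scale_type (generate_simple_harmony_py melody_midi key_name scale_type)

-- ===== LEMMAS AND PROOFS =====

theorem pvFitRaise_eq (m low : Int) :
    pvFitRaise m low = if m < low then low + (m - low) % 12 else m := by
  fun_induction pvFitRaise m low with
  | case1 m h ih =>
      rw [ih]; split_ifs with h5 <;> omega
  | case2 m h =>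
      rw [if_neg h]

theorem pvFitLower_eq (m high : Int) :
    pvFitLower m high = if m > high then m + 12 * ((high - m) / 12) else m := by
  fun_induction pvFitLower m high with
  | case1 m h ih =>
      rw [ih]
      have e1 := Int.ediv_add_emod (high - m) 12
      have e2 := Int.ediv_add_emod (high - (m - 12)) 12
      split_ifs with h5 <;> omega
  | case2 m h =>
      rw [if_neg h]

theorem pvFit_eq (m low high : Int) (hspan : low + 11 ≤ high) :
    pvFitToRange m low high = pvFitClosed m low high := by
  unfold pvFitToRange pvFitClosed
  rw [PySem.Int.mod_eq_emod_of_pos (by norm_num), PySem.Int.floordiv_eq_ediv_of_pos (by norm_num)]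
  by_cases h0 : m ≤ 0
  · simp [h0]
  · rw [if_neg h0, if_neg h0, pvFitRaise_eq]
    have hm1 := Int.emod_nonneg (m - low) (by norm_num : (12:Int) ≠ 0)
    have hm2 := Int.emod_lt_of_pos (m - low) (by norm_num : (0:Int) < 12)
    have hh1 := Int.emod_nonneg (high - m) (by norm_num : (12:Int) ≠ 0)
    have hh2 := Int.emod_lt_of_pos (high - m) (by norm_num : (0:Int) < 12)
    have eh := Int.ediv_add_emod (high - m) 12
    by_cases hlt : m < low
    · rw [if_pos hlt, if_pos hlt, pvFitLower_eq]
      rw [if_neg (by omega : ¬ low + (m - low) % 12 > high)]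
      omega
    · rw [if_neg hlt, if_neg hlt, pvFitLower_eq]
      by_cases hgt : m > high
      · omega
      · omega

theorem pvFold_eq (l : List Int) (third : Int)
    (s0 a0 t0 b0 : List Int) :
    l.foldl
      (fun (acc : List Int × List Int × List Int × List Int) midi_note =>
        let (soprano, alto, tenor, bass) := acc
        if midi_note ≤ 0 then
          (soprano ++ [0], alto ++ [0], tenor ++ [0], bass ++ [0])
        else
          let s := pvFitToRange midi_note 60 79
          let a := pvFitToRange (midi_note - third) 55 74
          let t := pvFitToRange (midi_note - 7) 48 69
          let b := pvFitToRange (midi_note - 12) 40 64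
          (soprano ++ [s], alto ++ [a], tenor ++ [t], bass ++ [b]))
      (s0, a0, t0, b0)
    = (s0 ++ pvVoice l 0 60 79, a0 ++ pvVoice l third 55 74,
       t0 ++ pvVoice l 7 48 69, b0 ++ pvVoice l 12 40 64) := by
  induction l generalizing s0 a0 t0 b0 with
  | nil => simp [pvVoice]
  | cons n tl ih =>
      simp only [List.foldl_cons, pvVoice, List.map_cons]
      by_cases hn : n ≤ 0
      · rw [if_neg (by omega : ¬ n > 0)]
        simp only [if_pos hn]
        rw [ih]
        simp [pvVoice]
        exact ⟨fun h => ((by omega : False)).elim, fun h => ((by omega : False)).elim,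
               fun h => ((by omega : False)).elim⟩
      · rw [if_pos (by omega : n > 0)]
        simp only [if_neg hn]
        rw [ih]
        simp only [pvVoice, List.append_assoc, List.singleton_append]
        rw [pvFit_eq n 60 79 (by norm_num),
            pvFit_eq (n - third) 55 74 (by norm_num),
            pvFit_eq (n - 7) 48 69 (by norm_num),
            pvFit_eq (n - 12) 40 64 (by norm_num)]
        simp
        exact ⟨fun h => absurd h hn, fun h => absurd h hn, fun h => absurd h hn⟩

-- ===== VERDICT (by name: the statement is the Claim_ definition above) =====
theorem generate_simple_harmony_py_spec : Claim_equal_generate_simple_harmony_py := by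
  intro melody_midi key_name scale_type _
  unfold Spec_generate_simple_harmony_py generate_simple_harmony_py generate_simple_harmony_py_alt
  simp only []
  rw [pvFold_eq melody_midi (if scale_type = "minor" then 3 else 4) [] [] [] []]
  simp
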